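-- pv_equiv track=rewrite | github.com/WassimZo/EpreuveDuFeu | feu00.py | createRectangle
-- ===== SOURCE A (Python) =====
-- def createRectangle(pair) :
--    rows = pair[1]
--    columns = pair[0]
--    rectangle = [[0]*columns for row in range(rows)]
--
--    for row in range(rows) :
--       for column in range(columns) :
--          if row == 0 and (column == 0 or column == columns-1) :
--       	    rectangle[row][column] = 'o'
--          elif row == rows-1 and (column == 0 or column == columns-1) :
--       	    rectangle[row][column] = 'o'
--          elif (column == 0 or column == columns-1) and (row != 0 or row != rows-1) :
--       	    rectangle[row][column] = '|'
--          elif (row == 0 or row == rows -1) and (column != 0 or column != columns-1) :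
--             rectangle[row][column] = '-'
--          else :
--             rectangle[row][column] = ' '
--    return rectangle
-- ===== SOURCE B (Python) =====
-- def createRectangle(pair):
--     columns, rows = pair
--     if columns <= 0:
--         border = []
--         interior = []
--     elif columns == 1:
--         border = ['o']
--         interior = ['|']
--     else:
--         border = ['o'] + ['-'] * (columns - 2) + ['o']
--         interior = ['|'] + [' '] * (columns - 2) + ['|']
--     return [list(border if r == 0 or r == rows - 1 else interior)
--             for r in range(rows)]
-- ===== Notes on version B (the rewrite author's own statement) =====
-- stated objective: faster
-- what changed: Instead of allocating a grid and re-assigning every cell through a five-way per-cell branch, B precomputes the two distinct row templates (border and interior) once from the column count and stamps a fresh copy of the right template per row.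
import Mathlib
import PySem

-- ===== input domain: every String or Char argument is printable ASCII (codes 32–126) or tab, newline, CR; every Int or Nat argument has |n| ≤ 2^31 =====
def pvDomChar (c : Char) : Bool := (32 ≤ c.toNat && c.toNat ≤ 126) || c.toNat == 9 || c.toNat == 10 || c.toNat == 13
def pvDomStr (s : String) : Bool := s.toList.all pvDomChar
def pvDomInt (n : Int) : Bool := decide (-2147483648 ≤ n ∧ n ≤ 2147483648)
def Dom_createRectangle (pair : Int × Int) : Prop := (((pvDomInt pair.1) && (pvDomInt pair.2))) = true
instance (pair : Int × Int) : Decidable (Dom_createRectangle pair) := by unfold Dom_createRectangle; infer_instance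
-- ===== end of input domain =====

-- B replaces A's per-cell five-way branch over a mutated grid by precomputing the two distinct
-- row templates (border / interior) and stamping one copy per row (measured constant-factor speedup; same O(R*C)).


-- ===== PORT A =====
-- the five-way if/elif chain assigned to rectangle[row][column] (same conditions, same order)
def cellA (rows columns row column : Int) : String :=
  if row = 0 ∧ (column = 0 ∨ column = columns - 1) then "o"
  else if row = rows - 1 ∧ (column = 0 ∨ column = columns - 1) then "o"
  else if (column = 0 ∨ column = columns - 1) ∧ (row ≠ 0 ∨ row ≠ rows - 1) then "|"
  else if (row = 0 ∨ row = rows - 1) ∧ (column ≠ 0 ∨ column ≠ columns - 1) then "-"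
  else " "

-- Python initialises the grid cells with the int 0; every cell is overwritten before return,
-- so the placeholder is rendered as the string "0" (never observable in the result).
def createRectangle (pair : Int × Int) : List (List String) :=
  let rows := pair.2
  let columns := pair.1
  let rectangle := (PySem.List.pyRange 0 rows 1).map
    (fun _ => (PySem.List.pyRange 0 columns 1).map (fun _ => ("0" : String)))
  (PySem.List.pyRange 0 rows 1).foldl (fun rect row =>
    (PySem.List.pyRange 0 columns 1).foldl (fun rect column =>
      rect.set row.toNat ((rect.getD row.toNat []).set column.toNat
        (cellA rows columns row column))) rect) rectangle

-- ===== PORT B =====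
def createRectangle_alt (pair : Int × Int) : List (List String) :=
  let columns := pair.1
  let rows := pair.2
  let border : List String :=
    if columns ≤ 0 then []
    else if columns = 1 then ["o"]
    else ["o"] ++ List.replicate (columns - 2).toNat "-" ++ ["o"]
  let interior : List String :=
    if columns ≤ 0 then []
    else if columns = 1 then ["|"]
    else ["|"] ++ List.replicate (columns - 2).toNat " " ++ ["|"]
  (PySem.List.pyRange 0 rows 1).map
    (fun r => if r = 0 ∨ r = rows - 1 then border else interior)

-- ===== PRECONDITION & SPEC =====
def Spec_createRectangle (pair : Int × Int) (out : List (List String)) : Prop := out = createRectangle_alt pair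
instance (pair : Int × Int) (out : List (List String)) : Decidable (Spec_createRectangle pair out) := by unfold Spec_createRectangle; infer_instance

-- ===== CLAIM (what is proved, stated in full; the proofs are below) =====
def Claim_equal_createRectangle : Prop := ∀ (pair : Int × Int), Dom_createRectangle pair → Spec_createRectangle pair (createRectangle pair)

-- ===== LEMMAS AND PROOFS =====

theorem set_getD_self {α : Type} (d : α) (l : List α) (i : Nat) (h : i < l.length) :
    l.set i (l.getD i d) = l := by
  simp only [List.getD_eq_getElem?_getD, List.getElem?_eq_getElem h]
  simp

theorem getD_set_self {α : Type} (d : α) (l : List α) (i : Nat) (v : α) (h : i < l.length) :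
    (l.set i v).getD i d = v := by
  simp [List.getD_eq_getElem?_getD, h]

-- inner loop: a foldl that keeps rewriting one fixed row equals a single set of that row
theorem inner_foldl_set {α : Type} (g : Nat → α) :
    ∀ (cs : List Nat) (rect : List (List α)) (row : Nat), row < rect.length →
    cs.foldl (fun rect c => rect.set row ((rect.getD row []).set c (g c))) rect
    = rect.set row (cs.foldl (fun r c => r.set c (g c)) (rect.getD row [])) := by
  intro cs
  induction cs with
  | nil =>
    intro rect row h
    rw [List.foldl_nil, List.foldl_nil]
    exact (set_getD_self _ _ _ h).symm
  | cons c cs ih =>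
    intro rect row h
    rw [List.foldl_cons, List.foldl_cons, ih _ row (by simpa using h),
        getD_set_self _ _ _ _ h, List.set_set]

-- loop-shape lemma: a foldl over range n whose step rewrites index i from the old entry at i
-- turns the first n entries into a map and keeps the tail
theorem foldl_range_set {α : Type} (d : α) (G : Nat → α → α) (Φ : List α → Nat → List α)
    (L : Nat)
    (hΦ : ∀ (s : List α) (i : Nat), s.length = L → i < L → Φ s i = s.set i (G i (s.getD i d))) :
    ∀ (n : Nat) (init : List α), init.length = L → n ≤ L →
    (List.range n).foldl Φ init
    = (List.range n).map (fun i => G i (init.getD i d)) ++ init.drop n := by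
  intro n
  induction n with
  | zero => intro init _ _; simp
  | succ n ih =>
    intro init hlen hle
    rw [List.range_succ, List.foldl_append, List.foldl_cons, List.foldl_nil,
        ih init hlen (by omega)]
    have hlen2 : ((List.range n).map (fun i => G i (init.getD i d)) ++ init.drop n).length = L := by
      simp; omega
    rw [hΦ _ n hlen2 (by omega)]
    have hdg : ((List.range n).map (fun i => G i (init.getD i d)) ++ init.drop n).getD n d
        = init.getD n d := by
      rw [List.getD_append_right _ _ _ _ (by simp)]
      simp only [List.length_map, List.length_range, Nat.sub_self]
      rw [List.getD_eq_getElem?_getD, List.getElem?_drop, Nat.add_zero, ← List.getD_eq_getElem?_getD]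
    rw [hdg]
    have hset : ((List.range n).map (fun i => G i (init.getD i d)) ++ init.drop n).set n
          (G n (init.getD n d))
        = (List.range n).map (fun i => G i (init.getD i d)) ++
          (G n (init.getD n d)) :: init.drop (n + 1) := by
      rw [List.set_append_right _ _ (by simp)]
      congr 1
      simp only [List.length_map, List.length_range, Nat.sub_self]
      have hd : init.drop n = init.getD n d :: init.drop (n + 1) := by
        rw [List.getD_eq_getElem?_getD, List.getElem?_eq_getElem (by omega)]
        exact List.drop_eq_getElem_cons (by omega)
      rw [hd, List.set_cons_zero]
    rw [hset]
    simp

theorem cellA_eval (R C : Int) (i j : Nat) (hR : 0 < R) (hi : (i : Int) < R) (hj : (j : Int) < C) :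
    cellA R C i j = if i = 0 ∨ (i : Int) = R - 1
      then (if j = 0 ∨ (j : Int) = C - 1 then "o" else "-")
      else (if j = 0 ∨ (j : Int) = C - 1 then "|" else " ") := by
  unfold cellA
  split_ifs <;> first | rfl | omega

theorem tmpl_getElem (m : Nat) (hm : 2 ≤ m) (x y : String) (k : Nat) (hk : k < m)
    (hlen : k < ([x] ++ List.replicate (m-2) y ++ [x]).length) :
    ([x] ++ List.replicate (m-2) y ++ [x])[k]'hlen = if k = 0 ∨ k = m-1 then x else y := by
  rcases Nat.eq_zero_or_pos k with hk0 | hkpos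
  · subst hk0; simp
  · by_cases hkm : k = m - 1
    · subst hkm
      rw [List.getElem_append_right (by simp; omega)]
      simp
    · rw [List.getElem_append_left (by simp; omega)]
      rw [List.getElem_append_right (by simp; omega)]
      simp [List.getElem_replicate]
      omega

theorem map_cell_template (C : Int) (m : Nat) (hm : C.toNat = m) (hC2 : 2 ≤ C) (x y : String)
    (f : Nat → String) (hf : ∀ j, j < m → f j = if j = 0 ∨ j = m - 1 then x else y) :
    (List.range m).map f = [x] ++ List.replicate (C - 2).toNat y ++ [x] := by
  have hm2 : 2 ≤ m := by omega
  have h2 : (C - 2).toNat = m - 2 := by omega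
  rw [h2]
  apply List.ext_getElem
  · simp; omega
  · intro k h1 h2'
    rw [List.getElem_map, List.getElem_range, hf k (by simpa using h1)]
    rw [tmpl_getElem m hm2 x y k (by simpa using h1) h2']

theorem row_eq_template (R C : Int) (n : Nat) (hR : R = (n : Int)) (i : Nat) (hi : i < n) :
    (List.range C.toNat).map (fun (j : Nat) => cellA R C (i : Int) (j : Int))
    = if (i : Int) = 0 ∨ (i : Int) = R - 1
      then (if C ≤ 0 then [] else if C = 1 then ["o"]
            else ["o"] ++ List.replicate (C - 2).toNat "-" ++ ["o"])
      else (if C ≤ 0 then [] else if C = 1 then ["|"]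
            else ["|"] ++ List.replicate (C - 2).toNat " " ++ ["|"]) := by
  have hR0 : 0 < R := by omega
  have hiR : (i : Int) < R := by omega
  have hcell : ∀ j : Nat, j < C.toNat → cellA R C i j
      = if i = 0 ∨ (i : Int) = R - 1
        then (if j = 0 ∨ (j : Int) = C - 1 then "o" else "-")
        else (if j = 0 ∨ (j : Int) = C - 1 then "|" else " ") := by
    intro j hj
    exact cellA_eval R C i j hR0 hiR (by omega)
  by_cases hC0 : C ≤ 0
  · have hm0 : C.toNat = 0 := by omega
    rw [hm0]
    simp [hC0]
  · rw [not_le] at hC0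
    by_cases hrow : (i : Int) = 0 ∨ (i : Int) = R - 1
    · have hio : i = 0 ∨ (i : Int) = R - 1 := by
        rcases hrow with h | h
        · left; omega
        · right; exact h
      rw [if_pos hrow]
      by_cases hC1 : C = 1
      · subst hC1
        simp only [if_neg (by omega : ¬ (1:Int) ≤ 0)]
        rw [show ((1:Int)).toNat = 1 from rfl, List.range_one, List.map_cons, List.map_nil]
        rw [hcell 0 (by omega), if_pos hio]
        simp
      · rw [if_neg (by omega), if_neg hC1]
        apply map_cell_template C C.toNat rfl (by omega)
        intro j hj
        rw [hcell j hj, if_pos hio]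
        congr 1
        simp only [eq_iff_iff]
        omega
    · have hio : ¬ (i = 0 ∨ (i : Int) = R - 1) := by
        rcases not_or.mp hrow with ⟨h1, h2⟩
        exact not_or.mpr ⟨by omega, h2⟩
      rw [if_neg hrow]
      by_cases hC1 : C = 1
      · subst hC1
        simp only [if_neg (by omega : ¬ (1:Int) ≤ 0)]
        rw [show ((1:Int)).toNat = 1 from rfl, List.range_one, List.map_cons, List.map_nil]
        rw [hcell 0 (by omega), if_neg hio]
        simp
      · rw [if_neg (by omega), if_neg hC1]
        apply map_cell_template C C.toNat rfl (by omega)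
        intro j hj
        rw [hcell j hj, if_neg hio]
        congr 1
        simp only [eq_iff_iff]
        omega

theorem row_foldl_eq_map (C R : Int) (i : Nat) (r0 : List String) (h : r0.length = C.toNat) :
    (List.range C.toNat).foldl (fun (r : List String) (j : Nat) => r.set j (cellA R C (i : Int) (j : Int))) r0
    = (List.range C.toNat).map (fun (j : Nat) => cellA R C (i : Int) (j : Int)) := by
  rw [foldl_range_set ("0" : String) (fun j _ => cellA R C (i : Int) (j : Int))
      (fun s j => s.set j (cellA R C (i : Int) (j : Int))) C.toNat
      (by intro s j _ _; rfl) C.toNat r0 h le_rfl]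
  rw [List.drop_eq_nil_of_le (by omega), List.append_nil]

theorem createRectangle_eq_grid (pair : Int × Int) :
    createRectangle pair
    = (List.range pair.2.toNat).map (fun (i : Nat) =>
        (List.range pair.1.toNat).map (fun (j : Nat) => cellA pair.2 pair.1 (i : Int) (j : Int))) := by
  obtain ⟨C, R⟩ := pair
  simp only [createRectangle, PySem.List.pyRange_one, sub_zero, zero_add, List.map_map,
    Function.comp_def]
  rw [List.foldl_map]
  rw [foldl_range_set ([] : List String)
      (fun (i : Nat) (r0 : List String) => (List.range C.toNat).foldl
          (fun (r : List String) (j : Nat) => r.set j (cellA R C (i : Int) (j : Int))) r0)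
      _ R.toNat
      (by
        intro s i hs hi
        rw [List.foldl_map]
        simp only [Int.toNat_natCast]
        exact inner_foldl_set (fun (j : Nat) => cellA R C (i : Int) (j : Int))
          (List.range C.toNat) s i (by omega))
      R.toNat _ (by simp) le_rfl]
  rw [List.drop_eq_nil_of_le (by simp), List.append_nil]
  apply List.map_congr_left
  intro i hi
  have hin : i < R.toNat := List.mem_range.mp hi
  have hgetD : ((List.range R.toNat).map
        (fun _ => (List.range C.toNat).map (fun _ => ("0" : String)))).getD i []
      = (List.range C.toNat).map (fun _ => ("0" : String)) := by
    rw [List.getD_eq_getElem?_getD, List.getElem?_map, List.getElem?_range hin]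
    rfl
  rw [hgetD, row_foldl_eq_map C R i _ (by simp)]

theorem createRectangle_spec_aux (pair : Int × Int) :
    createRectangle pair = createRectangle_alt pair := by
  obtain ⟨C, R⟩ := pair
  rw [createRectangle_eq_grid]
  simp only [createRectangle_alt, PySem.List.pyRange_one, sub_zero, zero_add]
  rw [List.map_map]
  apply List.map_congr_left
  intro i hi
  have hin : i < R.toNat := List.mem_range.mp hi
  have hR : R = ((R.toNat : Nat) : Int) := by omega
  simp only [Function.comp_apply]
  rw [row_eq_template R C R.toNat hR i hin]

-- ===== VERDICT (by name: the statement is the Claim_ definition above) =====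
theorem createRectangle_spec : Claim_equal_createRectangle := by
  intro pair _
  unfold Spec_createRectangle
  exact createRectangle_spec_aux pair
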